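-- pv_equiv track=rewrite | github.com/Sonic0/local-crontab | local_crontab/local_crontab.py | _group_hours
-- ===== SOURCE A (Python) =====
-- from typing import Optional, List
--
-- CronConverterNestedLists = List[List[List[int]]]
--
-- def _group_hours(utc_list_crontabs: CronConverterNestedLists) -> CronConverterNestedLists:
--     """Group hours together by minute, day and month.
--
--     :param utc_list_crontabs: Nested list of crontabs not grouped.
--     :return: acc (nested list of ints): filtered nested list made up of cron lists readable by Cron-Converter Object.
--     """
--     acc = []
--     for element in utc_list_crontabs:
--         if len(acc) > 0 and \
--                 acc[-1][0] == element[0] and \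
--                 acc[-1][2] == element[2] and \
--                 acc[-1][3] == element[3]:
--             acc[-1][1].append(element[1][0])
--         else:
--             acc.append(element)
--     return acc
-- ===== SOURCE B (Python) =====
-- def _group_hours(utc_list_crontabs):
--     """Group hours together by minute, day and month.
--
--     Back-to-front scan: walk the input in reverse collecting the hour heads of
--     a run's non-first members in a pending buffer; on reaching the first entry
--     of a run (its predecessor's minute/day/month differ, or it is entry 0),
--     emit one fresh merged entry. The output is built reversed and flipped once
--     at the end. Unlike A, B does not mutate its argument; only the return
--     value is claimed equal.
--     """
--     xs = utc_list_crontabs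
--     out = []
--     pending = []  # hour heads of the current run's non-first entries, collected back-to-front
--     for i in range(len(xs) - 1, -1, -1):
--         e = xs[i]
--         if i > 0 and xs[i - 1][0] == e[0] and xs[i - 1][2] == e[2] and xs[i - 1][3] == e[3]:
--             pending.append(e[1][0])
--         else:
--             if pending:
--                 merged = list(e)
--                 merged[1] = e[1] + pending[::-1]
--                 out.append(merged)
--                 pending = []
--             else:
--                 out.append(e)
--     out.reverse()
--     return out
-- ===== Notes on version B (the rewrite author's own statement) =====
-- stated objective: alternative
-- what changed: B builds the output back-to-front: a single reverse pass compares each entry to its actual predecessor in the input, collects run members' hour heads in a pending buffer, emits one fresh merged entry per run when it reaches the run's first element, and reverses the output once at the end; A walks forward comparing each entry to acc[-1] and mutates acc[-1][1] in place. B does not mutate its argument; the claim is about the return value only.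
import Mathlib
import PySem

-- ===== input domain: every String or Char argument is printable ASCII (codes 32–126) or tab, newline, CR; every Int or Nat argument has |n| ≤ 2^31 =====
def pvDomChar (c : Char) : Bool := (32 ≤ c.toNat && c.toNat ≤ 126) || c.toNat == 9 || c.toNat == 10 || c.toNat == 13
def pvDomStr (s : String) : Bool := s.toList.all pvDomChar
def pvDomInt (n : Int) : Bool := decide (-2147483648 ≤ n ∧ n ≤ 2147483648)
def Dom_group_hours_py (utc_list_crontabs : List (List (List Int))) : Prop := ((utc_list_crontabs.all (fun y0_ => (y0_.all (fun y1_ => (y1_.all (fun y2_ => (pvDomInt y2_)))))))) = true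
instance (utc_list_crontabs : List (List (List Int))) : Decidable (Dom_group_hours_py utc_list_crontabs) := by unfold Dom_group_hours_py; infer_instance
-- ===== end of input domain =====

-- B builds the output back-to-front: one reverse pass comparing each entry to its input
-- predecessor, a pending buffer of the run's hour heads, one fresh merged entry per run,
-- and a final reverse — instead of A's forward compare-to-acc[-1] accumulator loop.
-- A mutates its argument's sublists in place, B does not: only the RETURN value is proved equal.

-- ===== PORT A =====
-- xs[i] with .getD default: Python raises exactly where pyGet? is none; those inputs are outside Pre_.
def pvGetL (l : List (List Int)) (i : Int) : List Int := (PySem.List.pyGet? l i).getD []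

def pvStepA (acc : List (List (List Int))) (element : List (List Int)) : List (List (List Int)) :=
  let last := (PySem.List.pyGet? acc (-1)).getD []
  if 0 < acc.length ∧ pvGetL last 0 = pvGetL element 0 ∧
      pvGetL last 2 = pvGetL element 2 ∧ pvGetL last 3 = pvGetL element 3 then
    acc.dropLast ++ [last.set 1 (pvGetL last 1 ++ [((PySem.List.pyGet? (pvGetL element 1) 0).getD 0)])]
  else
    acc ++ [element]

def group_hours_py (utc_list_crontabs : List (List (List Int))) : List (List (List Int)) :=
  utc_list_crontabs.foldl pvStepA []

-- ===== PORT B =====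
-- e[1][0], read exactly where Python reads it (none = IndexError, outside Pre_)
def pvHH (e : List (List Int)) : Int := (PySem.List.pyGet? (pvGetL e 1) 0).getD 0

-- one iteration of B's reverse loop; state = (out, pending)
def pvStepRev (xs : List (List (List Int))) (st : List (List (List Int)) × List Int) (i : Int) :
    List (List (List Int)) × List Int :=
  let e := (PySem.List.pyGet? xs i).getD []
  let p := (PySem.List.pyGet? xs (i - 1)).getD []
  if 0 < i ∧ pvGetL p 0 = pvGetL e 0 ∧ pvGetL p 2 = pvGetL e 2 ∧ pvGetL p 3 = pvGetL e 3 then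
    (st.1, st.2 ++ [pvHH e])
  else if st.2 ≠ [] then
    -- merged = list(e); merged[1] = e[1] + pending[::-1]
    (st.1 ++ [e.set 1 (pvGetL e 1 ++ st.2.reverse)], [])
  else
    (st.1 ++ [e], [])

def group_hours_py_alt (utc_list_crontabs : List (List (List Int))) : List (List (List Int)) :=
  (((PySem.List.pyRange ((utc_list_crontabs.length : Int) - 1) (-1) (-1)).foldl
      (pvStepRev utc_list_crontabs) ([], [])).1).reverse

-- ===== PRECONDITION & SPEC =====
-- Pre_ is exactly the condition under which Python A returns (and Python B too — both raise
-- IndexError on the same inputs): following the short-circuit comparisons, each adjacent pair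
-- must be long enough for every index access that is actually evaluated, and a pair that fully
-- matches on (minute, day, month) needs a nonempty hour list on its second entry.
def pvPairOk (a b : List (List Int)) : Prop :=
  1 ≤ a.length ∧ 1 ≤ b.length ∧
    (pvGetL a 0 = pvGetL b 0 →
      3 ≤ a.length ∧ 3 ≤ b.length ∧
        (pvGetL a 2 = pvGetL b 2 →
          4 ≤ a.length ∧ 4 ≤ b.length ∧ (pvGetL a 3 = pvGetL b 3 → pvGetL b 1 ≠ [])))

def Pre_group_hours_py (utc_list_crontabs : List (List (List Int))) : Prop :=
  List.IsChain pvPairOk utc_list_crontabs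
instance (utc_list_crontabs : List (List (List Int))) : Decidable (Pre_group_hours_py utc_list_crontabs) := by
  unfold Pre_group_hours_py pvPairOk; infer_instance

def pvWitness_group_hours_py : List (List (List Int)) :=
  [[[0], [1], [2], [3]], [[0], [7], [2], [3]], [[5], [1], [2], [3]]]

def Spec_group_hours_py (utc_list_crontabs : List (List (List Int))) (out : List (List (List Int))) : Prop := out = group_hours_py_alt utc_list_crontabs
instance (utc_list_crontabs : List (List (List Int))) (out : List (List (List Int))) : Decidable (Spec_group_hours_py utc_list_crontabs out) := by unfold Spec_group_hours_py; infer_instance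

-- ===== CLAIM (what is proved, stated in full; the proofs are below) =====
def Claim_equal_group_hours_py : Prop := ∀ (utc_list_crontabs : List (List (List Int))), Dom_group_hours_py utc_list_crontabs → Pre_group_hours_py utc_list_crontabs → Spec_group_hours_py utc_list_crontabs (group_hours_py utc_list_crontabs)

-- ===== LEMMAS AND PROOFS =====

-- the (minute, day, month) key both loops compare on
def pvKey (e : List (List Int)) : List Int × List Int × List Int :=
  (pvGetL e 0, pvGetL e 2, pvGetL e 3)

-- maximal runs of consecutive elements with equal key
def pvRuns (xs : List (List (List Int))) : List (List (List (List Int))) :=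
  match xs with
  | [] => []
  | x :: rest =>
    (x :: rest.takeWhile (fun e => decide (pvKey e = pvKey x))) ::
      pvRuns (rest.dropWhile (fun e => decide (pvKey e = pvKey x)))
termination_by xs.length
decreasing_by
  simpa using Nat.lt_succ_of_le (List.length_dropWhile_le _ _)

theorem pvRuns_nil : pvRuns [] = [] := by rw [pvRuns]

-- A's in-place append, as a function on the retained entry
def pvStepB (first : List (List Int)) (element : List (List Int)) : List (List Int) :=
  first.set 1 (pvGetL first 1 ++ [pvHH element])

-- what one run contributes to the output
def pvH (run : List (List (List Int))) : List (List (List Int)) :=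
  match run with
  | [] => []
  | first :: rest => [rest.foldl pvStepB first]

theorem pvGetL_nonneg (l : List (List Int)) (i : Int) (h : 0 ≤ i) :
    pvGetL l i = (l[i.toNat]?).getD [] := by
  rw [pvGetL, PySem.List.pyGet?_of_nonneg l h]

theorem pvKey_set (l : List (List Int)) (v : List Int) : pvKey (l.set 1 v) = pvKey l := by
  simp [pvKey, pvGetL_nonneg _ _ (by norm_num : (0:Int) ≤ 0),
    pvGetL_nonneg _ _ (by norm_num : (0:Int) ≤ 2), pvGetL_nonneg _ _ (by norm_num : (0:Int) ≤ 3)]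

theorem pvKey_eq_iff (a e : List (List Int)) :
    pvKey e = pvKey a ↔ (pvGetL a 0 = pvGetL e 0 ∧ pvGetL a 2 = pvGetL e 2 ∧ pvGetL a 3 = pvGetL e 3) := by
  simp only [pvKey, Prod.ext_iff]
  constructor <;> (rintro ⟨h0, h2, h3⟩; exact ⟨h0.symm, h2.symm, h3.symm⟩)

-- A's step on a nonempty accumulator p ++ [a]
theorem pvStepA_concat (p : List (List (List Int))) (a e : List (List Int)) :
    pvStepA (p ++ [a]) e =
      if pvKey e = pvKey a then p ++ [pvStepB a e] else (p ++ [a]) ++ [e] := by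
  simp only [pvStepA, pvStepB, pvHH, PySem.List.pyGet?_neg_one_append_singleton, Option.getD_some,
    List.dropLast_concat]
  by_cases h : pvKey e = pvKey a
  · rw [if_pos ⟨by simp, (pvKey_eq_iff a e).mp h⟩, if_pos h]
  · rw [if_neg (fun hc => h ((pvKey_eq_iff a e).mpr hc.2)), if_neg h]

theorem pvStepA_singleton (a e : List (List Int)) :
    pvStepA [a] e = if pvKey e = pvKey a then [pvStepB a e] else [a, e] := by
  have := pvStepA_concat [] a e
  simpa using this

theorem pvStepA_nil (e : List (List Int)) : pvStepA [] e = [e] := by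
  simp [pvStepA]

-- A's step only inspects the last element: a prefix passes through the fold untouched
theorem pvFoldA_prefix (xs : List (List (List Int))) :
    ∀ (p : List (List (List Int))) (a : List (List Int)),
      xs.foldl pvStepA (p ++ [a]) = p ++ xs.foldl pvStepA [a] := by
  induction xs with
  | nil => intro p a; simp
  | cons e xs ih =>
    intro p a
    rw [List.foldl_cons, List.foldl_cons, pvStepA_concat, pvStepA_singleton]
    by_cases h : pvKey e = pvKey a
    · rw [if_pos h, if_pos h, ih]
    · rw [if_neg h, if_neg h, ih (p ++ [a]) e,
        show ([a, e] : List (List (List Int))) = [a] ++ [e] from rfl, ih [a] e]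
      simp

theorem pvFoldB_key (t : List (List (List Int))) :
    ∀ a, pvKey (t.foldl pvStepB a) = pvKey a := by
  induction t with
  | nil => intro a; rfl
  | cons e t ih => intro a; rw [List.foldl_cons, ih, pvStepB, pvKey_set]

-- processing a run whose elements all share the start key keeps a singleton accumulator
theorem pvFoldA_run (t : List (List (List Int))) :
    ∀ a, (∀ e ∈ t, pvKey e = pvKey a) → t.foldl pvStepA [a] = [t.foldl pvStepB a] := by
  induction t with
  | nil => intro a _; rfl
  | cons e t ih =>
    intro a h
    rw [List.foldl_cons, pvStepA_singleton, if_pos (h e (by simp)), List.foldl_cons]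
    exact ih (pvStepB a e) (fun x hx => by
      rw [pvStepB, pvKey_set]; exact h x (by simp [hx]))

-- ===== A's accumulator loop computes the run decomposition =====
theorem pvFoldA_eq (n : Nat) :
    ∀ xs : List (List (List Int)), xs.length ≤ n →
      xs.foldl pvStepA [] = (pvRuns xs).flatMap pvH := by
  induction n with
  | zero =>
    intro xs h
    rw [List.length_eq_zero_iff.mp (Nat.le_zero.mp h), pvRuns_nil]
    rfl
  | succ n ih =>
    intro xs hlen
    rcases xs with _ | ⟨x, rest⟩
    · rw [pvRuns_nil]; rfl
    · set p : List (List Int) → Bool := fun e => decide (pvKey e = pvKey x) with hp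
      have hrun : (rest.takeWhile p).foldl pvStepA [x]
          = [(rest.takeWhile p).foldl pvStepB x] :=
        pvFoldA_run _ x (fun e he => by
          have := List.mem_takeWhile_imp he
          simpa [hp] using this)
      have hA : (x :: rest).foldl pvStepA [] =
          (rest.dropWhile p).foldl pvStepA [(rest.takeWhile p).foldl pvStepB x] := by
        conv_lhs => rw [List.foldl_cons, pvStepA_nil,
          show rest = rest.takeWhile p ++ rest.dropWhile p from
            (List.takeWhile_append_dropWhile).symm]
        rw [List.foldl_append, hrun]
      have hruns : pvRuns (x :: rest)
          = (x :: rest.takeWhile p) :: pvRuns (rest.dropWhile p) := by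
        rw [pvRuns]
      have hdlen : (rest.dropWhile p).length ≤ n := by
        have := List.length_dropWhile_le p rest
        simp only [List.length_cons] at hlen
        omega
      have hd := ih (rest.dropWhile p) hdlen
      rw [hruns, List.flatMap_cons,
        show pvH (x :: rest.takeWhile p) = [(rest.takeWhile p).foldl pvStepB x] from rfl,
        ← hd, hA]
      rcases hdW : rest.dropWhile p with _ | ⟨e, d'⟩
      · rw [List.foldl_nil, List.foldl_nil]
        rfl
      · have hne : rest.dropWhile p ≠ [] := by rw [hdW]; simp
        have hhead := List.head_dropWhile_not p hne
        simp only [hdW, List.head_cons] at hhead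
        have hkey : ¬ pvKey e = pvKey x := by simpa [hp] using hhead
        have hkeyA : ¬ pvKey e = pvKey ((rest.takeWhile p).foldl pvStepB x) := by
          rw [pvFoldB_key]; exact hkey
        rw [List.foldl_cons, pvStepA_singleton, if_neg hkeyA,
          show ([(rest.takeWhile p).foldl pvStepB x, e] : List (List (List Int)))
            = [(rest.takeWhile p).foldl pvStepB x] ++ [e] from rfl,
          pvFoldA_prefix d' _ e, List.foldl_cons, pvStepA_nil]

-- ===== B's reverse pass computes the same run decomposition =====
-- xs[k] for a Nat index
def pvGetN (xs : List (List (List Int))) (k : Nat) : List (List Int) := (xs[k]?).getD []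

-- folding A's per-element appends over a run tail = one set of the whole merged hour list
theorem pvFoldB_set (t : List (List (List Int))) :
    ∀ a : List (List Int), t.foldl pvStepB a = a.set 1 (pvGetL a 1 ++ t.map pvHH) := by
  induction t with
  | nil =>
    intro a
    rcases Nat.lt_or_ge 1 a.length with h | h
    · rw [List.foldl_nil, List.map_nil, List.append_nil, pvGetL_nonneg _ _ (by norm_num)]
      simp [List.getElem?_eq_getElem h, List.set_getElem_self]
    · rw [List.foldl_nil, List.set_eq_of_length_le h]
  | cons e t ih =>
    intro a
    rw [List.foldl_cons, ih, pvStepB]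
    rcases Nat.lt_or_ge 1 a.length with h | h
    · have hget : pvGetL (a.set 1 (pvGetL a 1 ++ [pvHH e])) 1 = pvGetL a 1 ++ [pvHH e] := by
        rw [pvGetL_nonneg _ _ (by norm_num)]
        simp [h]
      rw [hget, List.set_set]
      simp
    · rw [List.set_eq_of_length_le h, List.set_eq_of_length_le h, List.set_eq_of_length_le h]

-- the state spec of B's reverse loop after processing indices n-1 … j
def pvRevSpec (xs : List (List (List Int))) (j : Nat) : List (List (List Int)) × List Int :=
  if j = 0 then
    (((pvRuns xs).flatMap pvH).reverse, [])
  else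
    (((pvRuns ((xs.drop j).dropWhile (fun e => decide (pvKey e = pvKey (pvGetN xs (j - 1)))))).flatMap pvH).reverse,
      (((xs.drop j).takeWhile (fun e => decide (pvKey e = pvKey (pvGetN xs (j - 1))))).map pvHH).reverse)

theorem pvStepRev_cond (xs : List (List (List Int))) (st : List (List (List Int)) × List Int)
    (i : Int) (hi : 0 < i) :
    pvStepRev xs st i =
      if pvKey (pvGetN xs i.toNat) = pvKey (pvGetN xs (i.toNat - 1)) then
        (st.1, st.2 ++ [pvHH (pvGetN xs i.toNat)])
      else if st.2 ≠ [] then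
        (st.1 ++ [(pvGetN xs i.toNat).set 1 (pvGetL (pvGetN xs i.toNat) 1 ++ st.2.reverse)], [])
      else (st.1 ++ [pvGetN xs i.toNat], []) := by
  have he : (PySem.List.pyGet? xs i).getD [] = pvGetN xs i.toNat := by
    rw [PySem.List.pyGet?_of_nonneg xs (le_of_lt hi)]; rfl
  have hp : (PySem.List.pyGet? xs (i - 1)).getD [] = pvGetN xs (i.toNat - 1) := by
    rw [PySem.List.pyGet?_of_nonneg xs (by omega)]
    congr 2
    omega
  rw [pvStepRev]
  simp only [he, hp]
  by_cases h : pvKey (pvGetN xs i.toNat) = pvKey (pvGetN xs (i.toNat - 1))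
  · rw [if_pos ⟨hi, (pvKey_eq_iff _ _).mp h⟩, if_pos h]
  · rw [if_neg (fun hc => h ((pvKey_eq_iff _ _).mpr hc.2)), if_neg h]

-- at index 0 the 'i > 0 and …' guard is false: always flush
theorem pvStepRev_zero (xs : List (List (List Int))) (st : List (List (List Int)) × List Int) :
    pvStepRev xs st 0 =
      if st.2 ≠ [] then
        (st.1 ++ [(pvGetN xs 0).set 1 (pvGetL (pvGetN xs 0) 1 ++ st.2.reverse)], [])
      else (st.1 ++ [pvGetN xs 0], []) := by
  have he : (PySem.List.pyGet? xs (0 : Int)).getD [] = pvGetN xs 0 := by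
    rw [PySem.List.pyGet?_of_nonneg xs le_rfl]; rfl
  rw [pvStepRev]
  simp only [he]
  rw [if_neg (fun hc => by exact absurd hc.1 (by norm_num))]

theorem pvRevLoop (xs : List (List (List Int))) (m : Nat) :
    ∀ j : Nat, j + m = xs.length →
      (PySem.List.pyRange (j : Int) (xs.length : Int) 1).foldr
          (fun i st => pvStepRev xs st i) ([], []) = pvRevSpec xs j := by
  induction m with
  | zero =>
    intro j hj
    rw [PySem.List.pyRange_one_eq_nil (by omega), List.foldr_nil, pvRevSpec]
    have hd : xs.drop j = [] := List.drop_eq_nil_of_le (by omega)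
    split
    next h0 =>
      have : xs = [] := by
        have := hd
        rw [h0] at this
        simpa using this
      rw [this, pvRuns_nil]
      rfl
    next =>
      rw [hd]
      simp [pvRuns_nil]
  | succ m ih =>
    intro j hj
    have hjlt : j < xs.length := by omega
    have hx : xs.drop j = xs[j] :: xs.drop (j + 1) := List.drop_eq_getElem_cons hjlt
    have hgj : pvGetN xs j = xs[j] := by simp [pvGetN, List.getElem?_eq_getElem hjlt]
    rw [PySem.List.pyRange_one_cons (by exact_mod_cast hjlt), List.foldr_cons,
      show ((j : Int) + 1) = ((j + 1 : Nat) : Int) by push_cast; ring,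
      ih (j + 1) (by omega)]
    have hIH : pvRevSpec xs (j + 1) =
        (((pvRuns ((xs.drop (j + 1)).dropWhile (fun e => decide (pvKey e = pvKey (xs[j]))))).flatMap pvH).reverse,
          (((xs.drop (j + 1)).takeWhile (fun e => decide (pvKey e = pvKey (xs[j])))).map pvHH).reverse) := by
      rw [pvRevSpec, if_neg (by omega)]
      simp [hgj]
    rw [hIH]
    set t := (xs.drop (j + 1)).takeWhile (fun e => decide (pvKey e = pvKey (xs[j]))) with ht
    -- flushing the pending buffer yields exactly the run's merged entry
    have hout : (if (((t.map pvHH).reverse : List Int) ≠ []) then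
          ((((pvRuns ((xs.drop (j + 1)).dropWhile (fun e => decide (pvKey e = pvKey (xs[j]))))).flatMap pvH).reverse)
            ++ [(xs[j]).set 1 (pvGetL (xs[j]) 1 ++ ((t.map pvHH).reverse).reverse)], ([] : List Int))
        else ((((pvRuns ((xs.drop (j + 1)).dropWhile (fun e => decide (pvKey e = pvKey (xs[j]))))).flatMap pvH).reverse)
            ++ [xs[j]], ([] : List Int)))
        = ((((pvRuns (xs.drop j)).flatMap pvH).reverse), ([] : List Int)) := by
      have hruns : pvRuns (xs.drop j)
          = (xs[j] :: t) :: pvRuns ((xs.drop (j + 1)).dropWhile (fun e => decide (pvKey e = pvKey (xs[j])))) := by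
        rw [hx, pvRuns, ← ht]
      have hfold : pvH (xs[j] :: t) = [t.foldl pvStepB (xs[j])] := rfl
      rw [hruns, List.flatMap_cons, hfold, List.reverse_append]
      by_cases hp : t.map pvHH = []
      · have htnil : t = [] := List.map_eq_nil_iff.mp hp
        rw [if_neg (by simp [hp]), htnil]
        simp
      · rw [if_pos (by simpa using hp), List.reverse_reverse, ← pvFoldB_set]
        simp
    by_cases h0 : j = 0
    · -- index 0: the i > 0 guard fails, flush; spec is the whole-list run decomposition
      subst h0
      rw [show ((0 : Nat) : Int) = (0 : Int) from rfl, pvStepRev_zero, hgj]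
      rw [hout, pvRevSpec, if_pos rfl, List.drop_zero]
    · have hj0 : 0 < j := by omega
      rw [pvStepRev_cond xs _ (j : Int) (by exact_mod_cast hj0)]
      have htj : (j : Int).toNat = j := by omega
      rw [htj, hgj]
      by_cases hkey : pvKey (xs[j]) = pvKey (pvGetN xs (j - 1))
      · -- xs[j] continues the previous run: push its hour head onto pending
        rw [if_pos hkey, pvRevSpec, if_neg h0]
        have hpredeq : (fun e => decide (pvKey e = pvKey (pvGetN xs (j - 1))))
            = (fun e => decide (pvKey e = pvKey (xs[j]))) := by
          funext e
          rw [hkey]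
        rw [hpredeq, hx, List.dropWhile_cons, List.takeWhile_cons,
          if_pos (by simp), if_pos (by simp)]
        simp [← ht]
      · -- xs[j] starts a run: flush pending into one merged entry
        rw [if_neg hkey, hout, pvRevSpec, if_neg h0]
        have hd : (xs.drop j).dropWhile (fun e => decide (pvKey e = pvKey (pvGetN xs (j - 1)))) = xs.drop j := by
          rw [hx, List.dropWhile_cons, if_neg (by simpa using hkey)]
        have htk : (xs.drop j).takeWhile (fun e => decide (pvKey e = pvKey (pvGetN xs (j - 1)))) = [] := by
          rw [hx, List.takeWhile_cons, if_neg (by simpa using hkey)]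
        rw [hd, htk]
        rfl

-- ===== VERDICT (by name: the statement is the Claim_ definition above) =====
theorem group_hours_py_spec : Claim_equal_group_hours_py := by
  intro xs _ _
  unfold Spec_group_hours_py group_hours_py group_hours_py_alt
  rw [PySem.List.pyRange_neg_one_eq_reverse, List.foldl_reverse]
  have h : ((-1 : Int) + 1) = ((0 : Nat) : Int) := by norm_num
  rw [show ((xs.length : Int) - 1 + 1) = (xs.length : Int) by ring, h,
    pvRevLoop xs xs.length 0 (by omega), pvRevSpec, if_pos rfl, List.reverse_reverse,
    pvFoldA_eq xs.length xs le_rfl]
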